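-- pv_equiv track=rewrite | github.com/valazzamatteo/Google-Atelier | GoogleS2/Functi.py | recursiv_sum
-- ===== SOURCE A (Python) =====
-- def recursiv_sum(data):
--     if not data:
--         return 0, 0, 0
--     sumat, par, impar = recursiv_sum(data[1:])
--     nr = data[0]
--     if nr % 2 == 0:
--         par += nr
--     else:
--         impar += nr
--     sumat += nr
--     return sumat, par, impar
-- ===== SOURCE B (Python) =====
-- def recursiv_sum(data):
--     sumat = sum(data)
--     par = sum(x for x in data if x % 2 == 0)
--     return sumat, par, sumat - par
-- ===== Notes on version B (the rewrite author's own statement) =====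
-- stated objective: faster
-- what changed: Replaces the non-tail recursion with fresh slices by two builtin sum() passes (total and even-filtered) and computes the odd sum as their difference; correct because integer addition is commutative/associative.
import Mathlib
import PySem

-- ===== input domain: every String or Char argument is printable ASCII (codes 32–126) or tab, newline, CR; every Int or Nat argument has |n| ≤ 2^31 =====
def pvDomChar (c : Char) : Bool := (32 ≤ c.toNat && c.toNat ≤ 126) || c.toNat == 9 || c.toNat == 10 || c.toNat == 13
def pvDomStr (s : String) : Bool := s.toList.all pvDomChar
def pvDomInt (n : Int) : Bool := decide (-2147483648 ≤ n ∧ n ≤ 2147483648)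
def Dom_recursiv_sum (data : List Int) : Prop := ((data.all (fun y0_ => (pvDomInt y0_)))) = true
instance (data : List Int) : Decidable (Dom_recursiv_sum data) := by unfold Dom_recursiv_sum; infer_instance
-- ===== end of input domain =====

-- B replaces A's non-tail recursion (fresh slice per level) with two sum passes (total, even-filtered) and odd = total - even (objective: faster).
-- ===== PORT A =====
def recursiv_sum (data : List Int) : Int × Int × Int :=
  match data with
  | [] => (0, 0, 0)
  | nr :: rest =>
    let (sumat, par, impar) := recursiv_sum rest
    if PySem.Int.mod nr 2 == 0 then (sumat + nr, par + nr, impar)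
    else (sumat + nr, par, impar + nr)

-- ===== PORT B =====
def recursiv_sum_alt (data : List Int) : Int × Int × Int :=
  let sumat := data.foldl (· + ·) 0
  let par := (data.filter (fun x => PySem.Int.mod x 2 == 0)).foldl (· + ·) 0
  (sumat, par, sumat - par)

-- ===== PRECONDITION & SPEC =====
def Spec_recursiv_sum (data : List Int) (out : Int × Int × Int) : Prop := out = recursiv_sum_alt data
instance (data : List Int) (out : Int × Int × Int) : Decidable (Spec_recursiv_sum data out) := by unfold Spec_recursiv_sum; infer_instance

-- ===== CLAIM (what is proved, stated in full; the proofs are below) =====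
def Claim_equal_recursiv_sum : Prop := ∀ (data : List Int), Dom_recursiv_sum data → Spec_recursiv_sum data (recursiv_sum data)

-- ===== LEMMAS AND PROOFS =====
theorem foldl_add_shift (l : List Int) (a : Int) : l.foldl (· + ·) a = a + l.foldl (· + ·) 0 := by
  induction l generalizing a with
  | nil => simp
  | cons x xs ih => simp only [List.foldl_cons]; rw [ih (a + x), ih (0 + x)]; ring

theorem alt_cons (nr : Int) (rest : List Int) :
    recursiv_sum_alt (nr :: rest) =
      (let (sumat, par, impar) := recursiv_sum_alt rest
       if PySem.Int.mod nr 2 == 0 then (sumat + nr, par + nr, impar)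
       else (sumat + nr, par, impar + nr)) := by
  by_cases h : (PySem.Int.mod nr 2 == 0) = true
  · simp only [recursiv_sum_alt, List.filter_cons, List.foldl_cons, h, if_true]
    rw [foldl_add_shift rest (0 + nr), foldl_add_shift (rest.filter _) (0 + nr)]
    refine Prod.ext ?_ (Prod.ext ?_ ?_) <;> simp <;> ring
  · simp only [recursiv_sum_alt, List.filter_cons, List.foldl_cons, if_neg h]
    rw [foldl_add_shift rest (0 + nr)]
    refine Prod.ext ?_ (Prod.ext ?_ ?_) <;> simp <;> ring

theorem agree (data : List Int) : recursiv_sum data = recursiv_sum_alt data := by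
  induction data with
  | nil => rfl
  | cons nr rest ih => rw [alt_cons, recursiv_sum, ih]

-- ===== VERDICT (by name: the statement is the Claim_ definition above) =====
theorem recursiv_sum_spec : Claim_equal_recursiv_sum := by
  intro data _
  unfold Spec_recursiv_sum
  exact agree data
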